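-- pv_equiv track=rewrite | github.com/gToye/informatica5 | strings/dronkenworden.py | dronken_voeren
-- ===== SOURCE A (Python) =====
-- def dronken_voeren(woord):
--     nieuw_woord = woord[0]
--     for i in range(1,len(woord)):
--         if i % 2 == 0:
--             letter = woord[i]
--             nieuw_woord += letter.upper()
--         elif nieuw_woord[-1] in 'AEIOU':
--             nieuw_woord+= woord[i].upper()
--         else:
--             nieuw_woord += woord[i].lower()
--     return nieuw_woord
-- ===== SOURCE B (Python) =====
-- def dronken_voeren(woord):
--     # pairwise stride-2 pass reading the source string directly (no look-back at the
--     # accumulated result): index 0 is kept raw and tested raw for the first pair,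
--     # every later even index is the uppercased anchor of its pair.
--     first = woord[0]
--     if len(woord) == 1:
--         return first
--     out = [first, woord[1].upper() if first in 'AEIOU' else woord[1].lower()]
--     for e in range(2, len(woord), 2):
--         a = woord[e].upper()
--         out.append(a)
--         if e + 1 < len(woord):
--             out.append(woord[e + 1].upper() if a in 'AEIOU' else woord[e + 1].lower())
--     return ''.join(out)
-- ===== Notes on version B (the rewrite author's own statement) =====
-- stated objective: alternative
-- what changed: Replaces the step-1 loop that branches on i%2 and re-reads the last char of the accumulated result with a stride-2 pairwise pass that reads only the source string: the first pair uses the raw first char's vowel test, each later pair appends the uppercased anchor and cases its partner on that anchor.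
-- outside the precondition, e.g. on dronken_voeren(''): A raises IndexError, B raises IndexError
import Mathlib
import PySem

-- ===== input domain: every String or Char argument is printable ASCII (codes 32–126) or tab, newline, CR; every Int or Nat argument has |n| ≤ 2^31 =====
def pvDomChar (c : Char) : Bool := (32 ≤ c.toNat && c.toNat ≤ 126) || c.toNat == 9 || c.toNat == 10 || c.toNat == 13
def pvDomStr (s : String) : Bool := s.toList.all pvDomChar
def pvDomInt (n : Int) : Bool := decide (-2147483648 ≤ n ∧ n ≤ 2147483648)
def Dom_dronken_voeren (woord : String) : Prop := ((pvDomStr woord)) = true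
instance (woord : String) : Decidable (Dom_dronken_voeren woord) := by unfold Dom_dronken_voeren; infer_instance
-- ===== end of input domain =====

-- B replaces A's step-1 loop (branching on i % 2 and re-reading the last char of the
-- accumulated result) by a stride-2 pairwise pass reading only the source string; same
-- return value on every non-empty string (both raise IndexError on "").

-- single-char Python test `c in 'AEIOU'` = membership of the char (exact for 1-char needles)
def pvVowelsU : List Char := ['A', 'E', 'I', 'O', 'U']

-- ===== PORT A =====
-- A's loop body: i even → append woord[i].upper(); i odd → branch on nieuw_woord[-1]
def pvStepA (cs : List Char) (nieuw : List Char) (i : Int) : List Char :=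
  if PySem.Int.mod i 2 == 0 then
    nieuw ++ [PySem.Chars.upperChar (PySem.List.pyGetD cs i ' ')]
  else if pvVowelsU.contains (PySem.List.pyGetD nieuw (-1) ' ') then
    nieuw ++ [PySem.Chars.upperChar (PySem.List.pyGetD cs i ' ')]
  else
    nieuw ++ [PySem.Chars.lowerChar (PySem.List.pyGetD cs i ' ')]

def dronken_voeren (woord : String) : String :=
  match PySem.Str.pyGet? woord 0 with    -- woord[0]; none = IndexError, excluded by Pre_
  | none => ""
  | some c0 =>
    let cs := woord.toList
    String.ofList ((PySem.List.pyRange 1 (cs.length : Int) 1).foldl (pvStepA cs) [c0])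

-- ===== PORT B =====
-- the stride-2 loop `for e in range(2, n, 2)` consumes woord[e], woord[e+1] per step
def pvPairsB : List Char → List Char
  | [] => []
  | [a] => [PySem.Chars.upperChar a]
  | a :: b :: rest =>
    PySem.Chars.upperChar a ::
      (if pvVowelsU.contains (PySem.Chars.upperChar a) then PySem.Chars.upperChar b
       else PySem.Chars.lowerChar b) :: pvPairsB rest

def dronken_voeren_alt (woord : String) : String :=
  match woord.toList with
  | [] => ""                             -- woord[0] raises here too; excluded by Pre_
  | [c0] => String.ofList [c0]
  | c0 :: c1 :: rest =>
    String.ofList (c0 ::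
      (if pvVowelsU.contains c0 then PySem.Chars.upperChar c1 else PySem.Chars.lowerChar c1) ::
      pvPairsB rest)

-- ===== PRECONDITION & SPEC =====
-- A raises IndexError on the empty string (woord[0]); so does B.
def Pre_dronken_voeren (woord : String) : Prop := woord.toList ≠ []
instance (woord : String) : Decidable (Pre_dronken_voeren woord) := by unfold Pre_dronken_voeren; infer_instance
def pvWitness_dronken_voeren : String := "proef"

def Spec_dronken_voeren (woord : String) (out : String) : Prop := out = dronken_voeren_alt woord
instance (woord : String) (out : String) : Decidable (Spec_dronken_voeren woord out) := by unfold Spec_dronken_voeren; infer_instance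

-- ===== CLAIM (what is proved, stated in full; the proofs are below) =====
def Claim_equal_dronken_voeren : Prop := ∀ (woord : String), Dom_dronken_voeren woord → Pre_dronken_voeren woord → Spec_dronken_voeren woord (dronken_voeren woord)

-- ===== LEMMAS AND PROOFS =====

lemma pvDropGet? (cs t : List Char) (e : Nat) (x : Char) (h : cs.drop e = x :: t) :
    cs[e]? = some x := by
  have h0 : (cs.drop e)[0]? = some x := by rw [h]; rfl
  rw [List.getElem?_drop] at h0
  simpa using h0

lemma pvLoopA_eq (rest : List Char) : ∀ (cs : List Char) (e : Nat) (acc : List Char),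
    e % 2 = 0 → e ≤ cs.length → cs.drop e = rest →
    (PySem.List.pyRange (e : Int) (cs.length : Int) 1).foldl (pvStepA cs) acc
      = acc ++ pvPairsB rest := by
  induction rest using pvPairsB.induct with
  | case1 =>
    intro cs e acc hpar hle hdrop
    have : cs.length ≤ e := by
      by_contra h
      have := List.drop_eq_nil_iff.mp hdrop
      omega
    have he : e = cs.length := le_antisymm hle this
    rw [he, PySem.List.pyRange_one_eq_nil (le_refl _)]
    simp [pvPairsB]
  | case2 a =>
    intro cs e acc hpar hle hdrop
    have hlen : cs.length = e + 1 := by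
      have := congrArg List.length hdrop
      simp at this; omega
    have ha : cs[e]? = some a := pvDropGet? cs [] e a hdrop
    have hr : PySem.List.pyRange (e : Int) (cs.length : Int) 1 = [(e : Int)] := by
      rw [hlen]; push_cast; exact PySem.List.pyRange_one_singleton e
    have hdvd : (2 : Int) ∣ (e : Int) := by omega
    rw [hr]
    simp [pvStepA, hdvd, pvPairsB, ha]
  | case3 a b rest' IH =>
    intro cs e acc hpar hle hdrop
    have hlen : e + 2 ≤ cs.length := by
      have := congrArg List.length hdrop
      simp at this; omega
    have ha : cs[e]? = some a := pvDropGet? cs _ e a hdrop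
    have hdrop1 : cs.drop (e + 1) = b :: rest' := by
      have := congrArg (List.drop 1) hdrop
      simpa [List.drop_drop, Nat.add_comm] using this
    have hb : cs[e + 1]? = some b := pvDropGet? cs _ (e + 1) b hdrop1
    have hdrop2 : cs.drop (e + 2) = rest' := by
      have := congrArg (List.drop 1) hdrop1
      rw [List.drop_drop] at this
      simpa [show 1 + (e + 1) = e + 2 from by omega] using this
    have hr : PySem.List.pyRange (e : Int) (cs.length : Int) 1
        = (e : Int) :: ((e : Int) + 1) :: PySem.List.pyRange ((e : Int) + 2) (cs.length : Int) 1 := by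
      rw [PySem.List.pyRange_one_cons (by exact_mod_cast Nat.lt_of_lt_of_le (by omega) hlen),
          PySem.List.pyRange_one_cons (by omega),
          show ((e : Int) + 1 + 1) = (e : Int) + 2 from by ring]
    have hdvd : (2 : Int) ∣ (e : Int) := by omega
    have hndvd : ¬ (2 : Int) ∣ ((e : Int) + 1) := by omega
    rw [hr]
    simp only [List.foldl_cons]
    have step1 : pvStepA cs acc (e : Int) = acc ++ [PySem.Chars.upperChar a] := by
      simp [pvStepA, hdvd, ha]
    rw [step1]
    have hidx : ((e : Int) + 1) = ((e + 1 : Nat) : Int) := by push_cast; ring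
    have step2 : pvStepA cs (acc ++ [PySem.Chars.upperChar a]) ((e : Int) + 1)
        = acc ++ [PySem.Chars.upperChar a,
            if pvVowelsU.contains (PySem.Chars.upperChar a) then PySem.Chars.upperChar b
            else PySem.Chars.lowerChar b] := by
      rw [pvStepA, hidx]
      simp only [beq_iff_eq]
      rw [if_neg (by rw [← hidx, PySem.Int.mod_eq_zero_iff_dvd]; exact hndvd),
          PySem.List.pyGetD_neg_one_append_singleton,
          PySem.List.pyGetD_natCast, List.getD_eq_getElem?_getD, hb]
      simp only [Option.getD_some]
      split_ifs <;> simp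
    rw [step2]
    have := IH cs (e + 2) (acc ++ [PySem.Chars.upperChar a,
            if pvVowelsU.contains (PySem.Chars.upperChar a) then PySem.Chars.upperChar b
            else PySem.Chars.lowerChar b]) (by omega) hlen hdrop2
    rw [show ((e : Int) + 2) = ((e + 2 : Nat) : Int) by push_cast; ring, this]
    simp [pvPairsB]

-- ===== VERDICT =====
theorem dronken_voeren_spec : Claim_equal_dronken_voeren := by
  intro woord _ hpre
  unfold Spec_dronken_voeren Pre_dronken_voeren at *
  unfold dronken_voeren dronken_voeren_alt
  cases h : woord.toList with
  | nil => exact absurd h hpre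
  | cons c0 rest0 =>
    have hget : PySem.Str.pyGet? woord 0 = some c0 := by
      simp [PySem.Str.pyGet?, h]
    rw [hget]
    cases rest0 with
    | nil =>
      simp only []
      rw [show ((c0 :: ([] : List Char)).length : Int) = 1 by simp,
          PySem.List.pyRange_one_eq_nil (le_refl _)]
      simp
    | cons c1 rest2 =>
      simp only []
      set cs : List Char := c0 :: c1 :: rest2 with hcs
      have hr : PySem.List.pyRange 1 (cs.length : Int) 1
          = 1 :: PySem.List.pyRange 2 (cs.length : Int) 1 := by
        rw [PySem.List.pyRange_one_cons (by simp [hcs])]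
        norm_num
      rw [hr, List.foldl_cons]
      have step1 : pvStepA cs [c0] 1
          = [c0, if pvVowelsU.contains c0 then PySem.Chars.upperChar c1
                 else PySem.Chars.lowerChar c1] := by
        rw [pvStepA, if_neg (by decide)]
        have h1 : PySem.List.pyGetD cs 1 ' ' = c1 := by
          rw [show (1 : Int) = ((1 : Nat) : Int) by norm_num, PySem.List.pyGetD_natCast]
          simp [hcs]
        have hlast : PySem.List.pyGetD [c0] (-1) ' ' = c0 := by
          simp [PySem.List.pyGetD_neg_one]
        rw [h1, hlast]
        split_ifs <;> rfl
      rw [step1]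
      have := pvLoopA_eq rest2 cs 2 [c0, if pvVowelsU.contains c0 then PySem.Chars.upperChar c1
                 else PySem.Chars.lowerChar c1] (by omega) (by simp [hcs]) (by simp [hcs])
      rw [show (2 : Int) = ((2 : Nat) : Int) by norm_num, this]
      simp
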